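-- pv_equiv track=rewrite | github.com/xiaoyangjun24450/xyj-essay-assistant-skills | scripts/4_chunk_generator.py | _find_first_mismatch
-- ===== SOURCE A (Python) =====
-- from typing import Any, List
--
-- def _find_first_mismatch(
--
--     expected_para_ids: List[str],
--     actual_para_ids: List[str],
-- ) -> tuple[int, str, str] | None:
--     compare_length = min(len(expected_para_ids), len(actual_para_ids))
--     for index in range(compare_length):
--         if expected_para_ids[index] != actual_para_ids[index]:
--             return index + 1, expected_para_ids[index], actual_para_ids[index]
--     if len(expected_para_ids) != len(actual_para_ids):
--         expected_para_id = expected_para_ids[compare_length] if compare_length < len(expected_para_ids) else "<结束>"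
--         actual_para_id = actual_para_ids[compare_length] if compare_length < len(actual_para_ids) else "<结束>"
--         return compare_length + 1, expected_para_id, actual_para_id
--     return None
-- ===== SOURCE B (Python) =====
-- def _find_first_mismatch(expected_para_ids, actual_para_ids):
--     # Binary search for p = length of the longest common prefix of the two
--     # lists (prefix equality e[:k] == a[:k] is monotone in k), then build the
--     # answer from position p instead of scanning element by element.
--     m = min(len(expected_para_ids), len(actual_para_ids))
--     lo, hi = 0, m
--     while lo < hi:
--         mid = (lo + hi + 1) // 2
--         if expected_para_ids[:mid] == actual_para_ids[:mid]:
--             lo = mid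
--         else:
--             hi = mid - 1
--     if lo < m:
--         return lo + 1, expected_para_ids[lo], actual_para_ids[lo]
--     if len(expected_para_ids) != len(actual_para_ids):
--         expected_para_id = expected_para_ids[lo] if lo < len(expected_para_ids) else "<结束>"
--         actual_para_id = actual_para_ids[lo] if lo < len(actual_para_ids) else "<结束>"
--         return lo + 1, expected_para_id, actual_para_id
--     return None
-- ===== Notes on version B (the rewrite author's own statement) =====
-- stated objective: alternative
-- what changed: Replaces A's element-by-element linear scan with a binary search over k for the longest common prefix length (exploiting that prefix equality e[:k]==a[:k] is monotone in k), then derives the mismatch triple or the length-mismatch tail from that single position.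
import Mathlib
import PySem

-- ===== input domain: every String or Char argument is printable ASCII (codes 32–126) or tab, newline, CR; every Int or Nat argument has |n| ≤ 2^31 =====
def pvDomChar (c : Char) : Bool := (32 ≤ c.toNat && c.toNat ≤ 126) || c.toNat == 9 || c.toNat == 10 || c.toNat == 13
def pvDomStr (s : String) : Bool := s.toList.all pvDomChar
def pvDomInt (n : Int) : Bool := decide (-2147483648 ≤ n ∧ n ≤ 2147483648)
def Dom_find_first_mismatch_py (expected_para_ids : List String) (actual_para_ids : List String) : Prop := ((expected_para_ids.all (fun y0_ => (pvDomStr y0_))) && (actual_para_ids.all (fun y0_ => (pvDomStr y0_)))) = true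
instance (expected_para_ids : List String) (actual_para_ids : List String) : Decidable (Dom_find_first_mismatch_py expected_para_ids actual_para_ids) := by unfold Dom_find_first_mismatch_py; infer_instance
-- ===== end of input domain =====

-- B replaces A's linear scan by a binary search for the longest common prefix
-- length (prefix equality is monotone in its length); objective: alternative.

-- ===== PORT A =====
-- 'for index in range(compare_length): if exp[index] != act[index]: return …'
-- (indexing is always in range here, so getD is exact for Python's exp[index])
def pvLoopA (exp act : List String) (n i : Nat) : Option (Int × String × String) :=
  if i < n then
    if exp.getD i "" ≠ act.getD i "" then
      some ((i : Int) + 1, exp.getD i "", act.getD i "")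
    else pvLoopA exp act n (i + 1)
  else none
termination_by n - i

def find_first_mismatch_py (expected_para_ids : List String) (actual_para_ids : List String) : Option (Int × String × String) :=
  let compare_length := min expected_para_ids.length actual_para_ids.length
  match pvLoopA expected_para_ids actual_para_ids compare_length 0 with
  | some r => some r
  | none =>
    if expected_para_ids.length ≠ actual_para_ids.length then
      let expected_para_id := if compare_length < expected_para_ids.length then expected_para_ids.getD compare_length "" else "<结束>"
      let actual_para_id := if compare_length < actual_para_ids.length then actual_para_ids.getD compare_length "" else "<结束>"
      some ((compare_length : Int) + 1, expected_para_id, actual_para_id)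
    else none

-- ===== PORT B =====
-- the binary-search while-loop of Source B; e[:mid] is the slice xs.take mid
-- (mid ≥ 0, so List.take is exact for the Python slice e[:mid])
def pvBin (exp act : List String) (lo hi : Nat) : Nat :=
  if lo < hi then
    let mid := (lo + hi + 1) / 2
    if exp.take mid = act.take mid then pvBin exp act mid hi
    else pvBin exp act lo (mid - 1)
  else lo
termination_by hi - lo
decreasing_by all_goals omega

def find_first_mismatch_py_alt (expected_para_ids : List String) (actual_para_ids : List String) : Option (Int × String × String) :=
  let m := min expected_para_ids.length actual_para_ids.length
  let lo := pvBin expected_para_ids actual_para_ids 0 m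
  if lo < m then
    some ((lo : Int) + 1, expected_para_ids.getD lo "", actual_para_ids.getD lo "")
  else if expected_para_ids.length ≠ actual_para_ids.length then
    some ((lo : Int) + 1,
      (if lo < expected_para_ids.length then expected_para_ids.getD lo "" else "<结束>"),
      (if lo < actual_para_ids.length then actual_para_ids.getD lo "" else "<结束>"))
  else none

-- ===== PRECONDITION & SPEC =====
def Spec_find_first_mismatch_py (expected_para_ids : List String) (actual_para_ids : List String) (out : Option (Int × String × String)) : Prop := out = find_first_mismatch_py_alt expected_para_ids actual_para_ids
instance (expected_para_ids : List String) (actual_para_ids : List String) (out : Option (Int × String × String)) : Decidable (Spec_find_first_mismatch_py expected_para_ids actual_para_ids out) := by unfold Spec_find_first_mismatch_py; infer_instance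

-- ===== CLAIM (what is proved, stated in full; the proofs are below) =====
def Claim_equal_find_first_mismatch_py : Prop := ∀ (expected_para_ids : List String) (actual_para_ids : List String), Dom_find_first_mismatch_py expected_para_ids actual_para_ids → Spec_find_first_mismatch_py expected_para_ids actual_para_ids (find_first_mismatch_py expected_para_ids actual_para_ids)

-- ===== LEMMAS AND PROOFS =====

-- length of the longest common prefix (the quantity both programs locate)
def pfx : List String → List String → Nat
  | x :: xs, y :: ys => if x = y then pfx xs ys + 1 else 0
  | _, _ => 0

lemma pfx_le (e a : List String) : pfx e a ≤ min e.length a.length := by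
  induction e generalizing a with
  | nil => simp [pfx]
  | cons x xs ih =>
    cases a with
    | nil => simp [pfx]
    | cons y ys =>
      by_cases h : x = y
      · have := ih ys; simp [pfx, h]; omega
      · simp [pfx, h]

lemma getD_eq_of_lt_pfx (e a : List String) (j : Nat) (hj : j < pfx e a) :
    e.getD j "" = a.getD j "" := by
  induction e generalizing a j with
  | nil => simp [pfx] at hj
  | cons x xs ih =>
    cases a with
    | nil => simp [pfx] at hj
    | cons y ys =>
      by_cases h : x = y
      · cases j with
        | zero => simpa using h
        | succ j' =>
          simp only [pfx, h, if_true] at hj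
          simpa using ih ys j' (by omega)
      · simp [pfx, h] at hj

lemma getD_ne_at_pfx (e a : List String) (hp : pfx e a < min e.length a.length) :
    e.getD (pfx e a) "" ≠ a.getD (pfx e a) "" := by
  induction e generalizing a with
  | nil => simp at hp
  | cons x xs ih =>
    cases a with
    | nil => simp at hp
    | cons y ys =>
      by_cases h : x = y
      · simp only [pfx, h, if_true] at hp ⊢
        simp only [List.getD_cons_succ]
        exact ih ys (by simp at hp ⊢; omega)
      · simpa [pfx, h] using h

lemma take_eq_of_le_pfx (e a : List String) (k : Nat) (hk : k ≤ pfx e a) :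
    e.take k = a.take k := by
  induction e generalizing a k with
  | nil => cases a <;> simp [pfx] at hk <;> simp [hk]
  | cons x xs ih =>
    cases a with
    | nil => simp [pfx] at hk; simp [hk]
    | cons y ys =>
      by_cases h : x = y
      · cases k with
        | zero => simp
        | succ k' =>
          simp only [pfx, h, if_true] at hk
          simp [h, ih ys k' (by omega)]
      · simp [pfx, h] at hk; simp [hk]

lemma take_ne_of_pfx_lt (e a : List String) (k : Nat)
    (hm : pfx e a < min e.length a.length) (hk : pfx e a < k) :
    e.take k ≠ a.take k := by
  intro heq
  apply getD_ne_at_pfx e a hm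
  have h1 : (e.take k).getD (pfx e a) "" = (a.take k).getD (pfx e a) "" := by rw [heq]
  have he : (e.take k).getD (pfx e a) "" = e.getD (pfx e a) "" := by
    simp [List.getD, hk]
  have ha : (a.take k).getD (pfx e a) "" = a.getD (pfx e a) "" := by
    simp [List.getD, hk]
  rw [he, ha] at h1; exact h1

-- the binary search lands exactly on pfx
lemma pvBin_eq_pfx (e a : List String) :
    ∀ d lo hi, hi - lo = d → lo ≤ pfx e a → pfx e a ≤ hi →
      hi ≤ min e.length a.length → pvBin e a lo hi = pfx e a := by
  intro d
  induction d using Nat.strong_induction_on with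
  | _ d ih =>
    intro lo hi hd hlo hhi hm
    rw [pvBin]
    by_cases hlt : lo < hi
    · simp only [hlt, if_true]
      set mid := (lo + hi + 1) / 2 with hmid
      have h1 : lo + 1 ≤ mid := by omega
      have h2 : mid ≤ hi := by omega
      by_cases heq : e.take mid = a.take mid
      · simp only [heq, if_true]
        have hmp : mid ≤ pfx e a := by
          by_contra hc
          exact take_ne_of_pfx_lt e a mid (by omega) (by omega) heq
        exact ih (hi - mid) (by omega) mid hi rfl hmp hhi hm
      · simp only [heq, if_false]
        have hpm : pfx e a ≤ mid - 1 := by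
          by_contra hc
          exact heq (take_eq_of_le_pfx e a mid (by omega))
        exact ih ((mid - 1) - lo) (by omega) lo (mid - 1) rfl hlo hpm (by omega)
    · simp only [hlt, if_false]; omega

-- A's loop returns the first mismatch, characterised through pfx
lemma loopA_eq (e a : List String) :
    ∀ d i, min e.length a.length - i = d → i ≤ pfx e a →
      pvLoopA e a (min e.length a.length) i =
        (if pfx e a < min e.length a.length then
          some ((pfx e a : Int) + 1, e.getD (pfx e a) "", a.getD (pfx e a) "")
        else none) := by
  intro d
  induction d using Nat.strong_induction_on with
  | _ d ih =>
    intro i hd hi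
    rw [pvLoopA]
    by_cases hlt : i < min e.length a.length
    · simp only [hlt, if_true]
      by_cases hne : e.getD i "" ≠ a.getD i ""
      · have hip : pfx e a ≤ i := by
          by_contra hc
          exact hne (getD_eq_of_lt_pfx e a i (by omega))
        have hieq : i = pfx e a := by omega
        subst hieq
        rw [if_pos hne, if_pos hlt]
      · rw [not_not] at hne
        have hip : i < pfx e a := by
          by_contra hc
          have hieq2 : pfx e a = i := by have := pfx_le e a; omega
          rw [← hieq2] at hne hlt
          exact getD_ne_at_pfx e a hlt hne
        simp only [hne, ne_eq, not_true_eq_false, if_false]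
        exact ih (min e.length a.length - (i + 1)) (by omega) (i + 1) rfl (by omega)
    · simp only [hlt, if_false]
      have : pfx e a = i := by have := pfx_le e a; omega
      simp [this, hlt]

-- ===== VERDICT (by name: the statement is the Claim_ definition above) =====
theorem find_first_mismatch_py_spec : Claim_equal_find_first_mismatch_py := by
  intro e a _
  show find_first_mismatch_py e a = find_first_mismatch_py_alt e a
  have hbin := pvBin_eq_pfx e a (min e.length a.length - 0) 0 (min e.length a.length)
    rfl (Nat.zero_le _) (pfx_le e a) (le_refl _)
  have hloop := loopA_eq e a (min e.length a.length - 0) 0 rfl (Nat.zero_le _)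
  simp only [find_first_mismatch_py, find_first_mismatch_py_alt, hbin, hloop]
  by_cases hp : pfx e a < min e.length a.length
  · simp [hp]
  · simp only [hp, if_false]
    have hpe : pfx e a = min e.length a.length := by have := pfx_le e a; omega
    rw [hpe]
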